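-- pv_equiv track=rewrite | github.com/Romaanj/dllm_basic_gsm8k_benchmark_test | llada/plot_pmr_compare_histograms.py | discover_metric_pairs
-- ===== SOURCE A (Python) =====
-- from typing import Dict, List, Tuple
--
-- def discover_metric_pairs(rows: List[Dict[str, str]]) -> List[Tuple[str, str, str]]:
--     if not rows:
--         return []
--     cols = list(rows[0].keys())
--
--     metric_suffixes = []
--     for c in cols:
--         if c.startswith("sigmoid_"):
--             suffix = c[len("sigmoid_"):]
--             inv_col = f"inverse_{suffix}"
--             if inv_col in cols:
--                 metric_suffixes.append(suffix)
--
--     # 요청 우선순위: topk_conf_mean, pmr_topk, 다음 블록 메트릭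
--     preferred = [
--         "topk_conf_mean",
--         "pmr_topk",
--         "next_block_size_mean",
--         "next_block_low_conf_ratio_mean",
--     ]
--     ordered = []
--     seen = set()
--     for s in preferred + metric_suffixes:
--         if s in seen:
--             continue
--         sig = f"sigmoid_{s}"
--         inv = f"inverse_{s}"
--         if sig in cols and inv in cols:
--             ordered.append((s, sig, inv))
--             seen.add(s)
--     return ordered
-- ===== SOURCE B (Python) =====
-- from typing import Dict, List, Tuple
--
-- PREFERRED = [
--     "topk_conf_mean",
--     "pmr_topk",
--     "next_block_size_mean",
--     "next_block_low_conf_ratio_mean",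
-- ]
--
-- def discover_metric_pairs(rows: List[Dict[str, str]]) -> List[Tuple[str, str, str]]:
--     # Bucket the valid sigmoid_/inverse_ pairs by priority in ONE pass over the
--     # columns, then flatten: bucket i holds PREFERRED[i], the last bucket holds
--     # everything else in column order.
--     if not rows:
--         return []
--     cols = list(rows[0].keys())
--     prio = {name: i for i, name in enumerate(PREFERRED)}
--     buckets = [[] for _ in range(len(PREFERRED) + 1)]
--     for c in cols:
--         if c.startswith("sigmoid_"):
--             s = c[len("sigmoid_"):]
--             inv = f"inverse_{s}"
--             if inv in cols:
--                 buckets[prio.get(s, len(PREFERRED))].append((s, c, inv))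
--     return [p for b in buckets for p in b]
-- ===== Notes on version B (the rewrite author's own statement) =====
-- stated objective: simpler
-- what changed: Replaces A's two-phase scheme (collect suffixes, then re-scan preferred+suffixes with a seen-set and repeated membership checks) by a single bucket pass: each valid sigmoid_/inverse_ column is dropped into a priority bucket and the buckets are flattened.
import Mathlib
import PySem

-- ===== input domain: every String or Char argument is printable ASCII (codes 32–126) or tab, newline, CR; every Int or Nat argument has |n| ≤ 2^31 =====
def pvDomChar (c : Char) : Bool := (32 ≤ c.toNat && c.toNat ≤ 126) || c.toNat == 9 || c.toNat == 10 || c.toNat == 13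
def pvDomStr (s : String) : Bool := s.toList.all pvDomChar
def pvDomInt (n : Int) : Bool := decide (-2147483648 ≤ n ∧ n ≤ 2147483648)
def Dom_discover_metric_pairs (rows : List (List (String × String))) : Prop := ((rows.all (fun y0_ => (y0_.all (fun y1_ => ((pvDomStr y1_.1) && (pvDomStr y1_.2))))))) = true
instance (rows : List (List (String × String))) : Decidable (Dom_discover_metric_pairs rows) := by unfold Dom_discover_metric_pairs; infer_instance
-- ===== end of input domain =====

-- B replaces A's two-phase scheme (collect suffixes, then re-scan preferred + suffixes
-- with a seen-set) by a single bucketing pass over the columns followed by a flatten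
-- (objective: simpler; same asymptotic cost).

-- ===== PORT A =====
def pvPreferred : List String :=
  ["topk_conf_mean", "pmr_topk", "next_block_size_mean", "next_block_low_conf_ratio_mean"]

def discover_metric_pairs (rows : List (List (String × String))) : List (String × String × String) :=
  match rows with
  | [] => []
  | r :: _ =>
    let cols := (PySem.Dict.ofList r).keys
    let metric_suffixes := cols.foldl (fun acc c =>
      if PySem.Str.startswith c "sigmoid_" then
        let suffix := PySem.Str.slice c (some 8) none
        let inv_col := "inverse_" ++ suffix
        if cols.contains inv_col then acc ++ [suffix] else acc
      else acc) []
    ((pvPreferred ++ metric_suffixes).foldl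
      (fun (st : List (String × String × String) × PySem.Set String) (s : String) =>
        if PySem.Set.contains st.2 s then st
        else
          let sig := "sigmoid_" ++ s
          let inv := "inverse_" ++ s
          if cols.contains sig && cols.contains inv then
            (st.1 ++ [(s, sig, inv)], PySem.Set.add st.2 s)
          else st)
      ([], PySem.Set.empty)).1

-- ===== PORT B =====
def discover_metric_pairs_alt (rows : List (List (String × String))) : List (String × String × String) :=
  match rows with
  | [] => []
  | r :: _ =>
    let cols := (PySem.Dict.ofList r).keys
    let prio := PySem.Dict.ofList ((PySem.List.enumerate pvPreferred).map (fun p => (p.2, p.1)))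
    let buckets0 : List (List (String × String × String)) :=
      (PySem.List.pyRange 0 ((pvPreferred.length : Int) + 1)).map (fun _ => [])
    let buckets := cols.foldl (fun bs c =>
      if PySem.Str.startswith c "sigmoid_" then
        let s := PySem.Str.slice c (some 8) none
        let inv := "inverse_" ++ s
        if cols.contains inv then
          let i := PySem.Dict.getD prio s (pvPreferred.length : Int)
          PySem.List.pySetD bs i (PySem.List.pyGetD bs i [] ++ [(s, c, inv)])
        else bs
      else bs) buckets0
    buckets.flatten

-- ===== PRECONDITION & SPEC =====
def Spec_discover_metric_pairs (rows : List (List (String × String))) (out : List (String × String × String)) : Prop := out = discover_metric_pairs_alt rows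
instance (rows : List (List (String × String))) (out : List (String × String × String)) : Decidable (Spec_discover_metric_pairs rows out) := by unfold Spec_discover_metric_pairs; infer_instance

-- ===== CLAIM (what is proved, stated in full; the proofs are below) =====
def Claim_equal_discover_metric_pairs : Prop := ∀ (rows : List (List (String × String))), Dom_discover_metric_pairs rows → Spec_discover_metric_pairs rows (discover_metric_pairs rows)

-- ===== LEMMAS AND PROOFS =====
-- proof-side abbreviations: pvSfx c = c[8:], pvIsPair marks a sigmoid_ column whose
-- inverse_ twin exists, pvValid lists the valid suffixes in column order, pvQ is the
-- membership test A's second loop performs, pvKey the priority rank of a suffix.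

def pvSfx (c : String) : String := PySem.Str.slice c (some 8) none
def pvIsPair (cols : List String) (c : String) : Bool :=
  PySem.Str.startswith c "sigmoid_" && cols.contains ("inverse_" ++ pvSfx c)
def pvValid (cols : List String) : List String := (cols.filter (pvIsPair cols)).map pvSfx
def pvQ (cols : List String) (s : String) : Bool :=
  cols.contains ("sigmoid_" ++ s) && cols.contains ("inverse_" ++ s)

lemma pv_toList_sfx (c : String) : (pvSfx c).toList = c.toList.drop 8 := by
  simp [pvSfx, PySem.Str.toList_slice, PySem.Chars.slice_eq_listSlice]
  rw [PySem.List.slice_from _ (by norm_num)]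
  rfl

lemma pv_decomp (c : String) (h : PySem.Str.startswith c "sigmoid_" = true) :
    c = "sigmoid_" ++ pvSfx c := by
  rw [PySem.Str.startswith_eq, PySem.Chars.startswith_iff] at h
  obtain ⟨t, ht⟩ := h
  rw [← String.toList_inj]
  simp [pv_toList_sfx, ← ht]

lemma pv_sfx_append (s : String) : pvSfx ("sigmoid_" ++ s) = s := by
  rw [← String.toList_inj, pv_toList_sfx]
  simp

lemma pv_starts_append (s : String) :
    PySem.Str.startswith ("sigmoid_" ++ s) "sigmoid_" = true := by
  rw [PySem.Str.startswith_eq, PySem.Chars.startswith_iff]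
  exact ⟨s.toList, by simp⟩

lemma pv_q_iff_mem (cols : List String) (s : String) :
    pvQ cols s = true ↔ s ∈ pvValid cols := by
  constructor
  · intro h
    simp only [pvQ, Bool.and_eq_true, List.contains_iff_mem] at h
    simp only [pvValid, List.mem_map, List.mem_filter]
    exact ⟨"sigmoid_" ++ s, ⟨h.1, by
      simp only [pvIsPair, Bool.and_eq_true]
      exact ⟨pv_starts_append s, by simp [pv_sfx_append, List.contains_iff_mem, h.2]⟩⟩,
      pv_sfx_append s⟩
  · intro h
    simp only [pvValid, List.mem_map, List.mem_filter] at h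
    obtain ⟨c, ⟨hc, hp⟩, hs⟩ := h
    simp only [pvIsPair, Bool.and_eq_true] at hp
    have hdec := pv_decomp c hp.1
    simp only [pvQ, Bool.and_eq_true, List.contains_iff_mem]
    constructor
    · rw [← hs]; rw [← hdec]; exact hc
    · rw [← hs]; simpa [List.contains_iff_mem] using hp.2

lemma pv_valid_nodup (cols : List String) (h : cols.Nodup) : (pvValid cols).Nodup := by
  apply List.Nodup.map_on
  · intro x hx y hy hxy
    simp only [List.mem_filter, pvIsPair, Bool.and_eq_true] at hx hy
    rw [pv_decomp x hx.2.1, pv_decomp y hy.2.1, hxy]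
  · exact h.filter _

lemma pv_loopA1 (cols : List String) : ∀ (l : List String) (init : List String),
    l.foldl (fun acc c =>
      if PySem.Str.startswith c "sigmoid_" then
        let suffix := PySem.Str.slice c (some 8) none
        let inv_col := "inverse_" ++ suffix
        if cols.contains inv_col then acc ++ [suffix] else acc
      else acc) init
    = init ++ (l.filter (pvIsPair cols)).map pvSfx := by
  intro l
  induction l with
  | nil => intro init; simp
  | cons c l ih =>
    intro init
    simp only [List.foldl_cons, List.filter_cons]
    by_cases h1 : PySem.Str.startswith c "sigmoid_" = true
    · by_cases h2 : cols.contains ("inverse_" ++ PySem.Str.slice c (some 8) none) = true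
      · have hp : pvIsPair cols c = true := by unfold pvIsPair pvSfx; rw [h1, h2]; rfl
        simp only [h1, h2, if_true, hp, ih]
        simp [pvSfx]
      · have h2' : cols.contains ("inverse_" ++ PySem.Str.slice c (some 8) none) = false := by
          simpa using h2
        have hp : pvIsPair cols c = false := by unfold pvIsPair pvSfx; rw [h1, h2']; rfl
        simp only [h1, if_true, h2', if_false, hp, ih]
        simp
    · have h1' : PySem.Str.startswith c "sigmoid_" = false := by simpa using h1
      have hp : pvIsPair cols c = false := by unfold pvIsPair; rw [h1']; rfl
      simp only [h1', Bool.false_eq_true, if_false, hp, ih]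

def pvPair (s : String) : String × String × String := (s, "sigmoid_" ++ s, "inverse_" ++ s)

lemma pv_filter_skip (pred : String → Bool) (s : String) (X : List String)
    (h : pred s = false) :
    List.filter pred (s :: PySem.Set.discard X s) = X.filter pred := by
  simp only [List.filter_cons, h, if_false, PySem.Set.discard, List.filter_filter]
  apply List.filter_congr
  intro a _
  by_cases ha : a = s
  · simp [ha, h]
  · simp [ha]

lemma pv_loopA2 (cols : List String) : ∀ (l : List String)
    (ordered : List (String × String × String)) (seen : PySem.Set String),
    (l.foldl (fun (st : List (String × String × String) × PySem.Set String) (s : String) =>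
        if PySem.Set.contains st.2 s then st
        else
          let sig := "sigmoid_" ++ s
          let inv := "inverse_" ++ s
          if cols.contains sig && cols.contains inv then
            (st.1 ++ [(s, sig, inv)], PySem.Set.add st.2 s)
          else st)
      (ordered, seen)).1
    = ordered ++ (((PySem.Set.ofList l).filter
        (fun s => pvQ cols s && !(PySem.Set.contains seen s))).map pvPair) := by
  intro l
  induction l with
  | nil => intro ordered seen; simp [PySem.Set.ofList, PySem.Set.empty]
  | cons s l ih =>
    intro ordered seen
    rw [PySem.Set.ofList_cons]
    simp only [List.foldl_cons]
    by_cases h1 : PySem.Set.contains seen s = true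
    · rw [if_pos h1, ih]
      rw [pv_filter_skip _ _ _ (by simp only [h1, Bool.not_true, Bool.and_false])]
    · have hc : PySem.Set.contains seen s = false := Bool.eq_false_iff.mpr h1
      rw [if_neg h1]
      by_cases h2 : (cols.contains ("sigmoid_" ++ s) && cols.contains ("inverse_" ++ s)) = true
      · simp only [h2, if_true, ih]
        have hnotmem : s ∉ seen := by simpa using h1
        have hadd : PySem.Set.add seen s = seen ++ [s] := PySem.Set.add_of_not_mem hnotmem
        have hpred : (fun x => pvQ cols x && !(PySem.Set.contains (PySem.Set.add seen s) x))
            = fun x => (pvQ cols x && !(PySem.Set.contains seen x)) && !(x == s) := by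
          funext x
          rw [hadd]
          simp only [PySem.Set.contains, List.contains_append]
          by_cases hx : x = s
          · simp [hx]
          · have hb : (x == s) = false := beq_eq_false_iff_ne.mpr hx
            simp [hb, hx, Bool.and_assoc]
        rw [hpred]
        have hq : pvQ cols s = true := h2
        rw [List.filter_cons]
        rw [show (pvQ cols s && !(PySem.Set.contains seen s)) = true by rw [hq, hc]; rfl]
        have hright : List.filter (fun x => pvQ cols x && !(PySem.Set.contains seen x))
              (PySem.Set.discard (PySem.Set.ofList l) s)
            = List.filter (fun x => (pvQ cols x && !(PySem.Set.contains seen x)) && !(x == s))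
              (PySem.Set.ofList l) := by
          simp only [PySem.Set.discard, List.filter_filter]
        simp only [if_true]
        rw [hright]
        simp [pvPair]
      · rw [if_neg h2, ih]
        have hq : pvQ cols s = false := Bool.eq_false_iff.mpr h2
        rw [pv_filter_skip _ _ _ (by rw [hq]; rfl)]

def pvKey (s : String) : Int :=
  if s = "next_block_low_conf_ratio_mean" then 3
  else if s = "next_block_size_mean" then 2
  else if s = "pmr_topk" then 1
  else if s = "topk_conf_mean" then 0
  else 4

lemma pv_getD_prio (s : String) :
    PySem.Dict.getD (PySem.Dict.ofList ((PySem.List.enumerate pvPreferred).map (fun p => (p.2, p.1)))) s (pvPreferred.length : Int) = pvKey s := by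
  have hd : (PySem.List.enumerate pvPreferred).map (fun p => (p.2, p.1))
      = [("topk_conf_mean", (0:Int)), ("pmr_topk", 1), ("next_block_size_mean", 2), ("next_block_low_conf_ratio_mean", 3)] := by decide
  rw [hd]
  show PySem.Dict.getD ((((PySem.Dict.empty.insert "topk_conf_mean" 0).insert "pmr_topk" 1).insert "next_block_size_mean" 2).insert "next_block_low_conf_ratio_mean" 3) s _ = _
  simp only [PySem.Dict.getD_insert]
  unfold pvKey
  split_ifs <;> simp [PySem.Dict.getD, PySem.Dict.get?, pvPreferred, PySem.Dict.empty]

def pvTr (c : String) : String × String × String := (pvSfx c, c, "inverse_" ++ pvSfx c)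

def pvBucket (cols : List String) (k : Int) (l : List String) : List (String × String × String) :=
  ((l.filter (pvIsPair cols)).filter (fun c => pvKey (pvSfx c) == k)).map pvTr

def pvStepB (cols : List String) (bs : List (List (String × String × String))) (c : String) :
    List (List (String × String × String)) :=
  if PySem.Str.startswith c "sigmoid_" then
    let s := PySem.Str.slice c (some 8) none
    let inv := "inverse_" ++ s
    if cols.contains inv then
      let i := PySem.Dict.getD (PySem.Dict.ofList ((PySem.List.enumerate pvPreferred).map (fun p => (p.2, p.1)))) s (pvPreferred.length : Int)
      PySem.List.pySetD bs i (PySem.List.pyGetD bs i [] ++ [(s, c, inv)])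
    else bs
  else bs

lemma pv_loopB (cols : List String) : ∀ (l : List String)
    (b0 b1 b2 b3 b4 : List (String × String × String)),
    l.foldl (pvStepB cols) [b0, b1, b2, b3, b4]
    = [b0 ++ pvBucket cols 0 l, b1 ++ pvBucket cols 1 l, b2 ++ pvBucket cols 2 l,
       b3 ++ pvBucket cols 3 l, b4 ++ pvBucket cols 4 l] := by
  intro l
  induction l with
  | nil => intro b0 b1 b2 b3 b4; simp [pvBucket]
  | cons c l ih =>
    intro b0 b1 b2 b3 b4
    rw [List.foldl_cons]
    by_cases h1 : PySem.Str.startswith c "sigmoid_" = true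
    · by_cases h2 : cols.contains ("inverse_" ++ PySem.Str.slice c (some 8) none) = true
      · have hp : pvIsPair cols c = true := by unfold pvIsPair pvSfx; rw [h1, h2]; rfl
        have hbucket : ∀ k : Int, pvBucket cols k (c :: l)
            = (if pvKey (pvSfx c) == k then [pvTr c] else []) ++ pvBucket cols k l := by
          intro k
          unfold pvBucket
          rw [List.filter_cons, if_pos hp, List.filter_cons]
          by_cases hk : pvKey (pvSfx c) == k
          · rw [if_pos hk]; simp [hk]
          · rw [if_neg hk]; simp [hk]
        have h5 : pvKey (pvSfx c) = 0 ∨ pvKey (pvSfx c) = 1 ∨ pvKey (pvSfx c) = 2 ∨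
            pvKey (pvSfx c) = 3 ∨ pvKey (pvSfx c) = 4 := by
          unfold pvKey; split_ifs <;> simp
        have hstep : pvStepB cols [b0, b1, b2, b3, b4] c
            = [b0 ++ (if pvKey (pvSfx c) == 0 then [pvTr c] else []),
               b1 ++ (if pvKey (pvSfx c) == 1 then [pvTr c] else []),
               b2 ++ (if pvKey (pvSfx c) == 2 then [pvTr c] else []),
               b3 ++ (if pvKey (pvSfx c) == 3 then [pvTr c] else []),
               b4 ++ (if pvKey (pvSfx c) == 4 then [pvTr c] else [])] := by
          unfold pvStepB
          rw [if_pos h1, if_pos h2, pv_getD_prio (PySem.Str.slice c (some 8) none)]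
          have hsfx : PySem.Str.slice c (some 8) none = pvSfx c := rfl
          rw [hsfx]
          rcases h5 with hk | hk | hk | hk | hk <;>
          · rw [hk]
            simp only [show ((0:Int)) = ((0:Nat):Int) from rfl, show ((1:Int)) = ((1:Nat):Int) from rfl,
              show ((2:Int)) = ((2:Nat):Int) from rfl, show ((3:Int)) = ((3:Nat):Int) from rfl,
              show ((4:Int)) = ((4:Nat):Int) from rfl,
              PySem.List.pySetD_natCast, PySem.List.pyGetD_natCast]
            norm_num [pvTr]
        rw [hstep, ih]
        simp only [hbucket]
        simp [List.append_assoc]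
      · have h2' : cols.contains ("inverse_" ++ PySem.Str.slice c (some 8) none) = false := by simpa using h2
        have hp : pvIsPair cols c = false := by unfold pvIsPair pvSfx; rw [h1, h2']; rfl
        have hstep : pvStepB cols [b0, b1, b2, b3, b4] c = [b0, b1, b2, b3, b4] := by
          unfold pvStepB
          rw [if_pos h1, if_neg h2]
        rw [hstep, ih]
        simp [pvBucket, List.filter_cons, hp]
    · have h1' : PySem.Str.startswith c "sigmoid_" = false := by simpa using h1
      have hp : pvIsPair cols c = false := by unfold pvIsPair; rw [h1']; rfl
      have hstep : pvStepB cols [b0, b1, b2, b3, b4] c = [b0, b1, b2, b3, b4] := by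
        unfold pvStepB
        rw [if_neg h1]
      rw [hstep, ih]
      simp [pvBucket, List.filter_cons, hp]

lemma pvB_char (r : List (String × String)) (rest : List (List (String × String))) :
    discover_metric_pairs_alt (r :: rest)
    = (((PySem.Dict.ofList r).keys.foldl (pvStepB (PySem.Dict.ofList r).keys)
        [[], [], [], [], []]).flatten) := by
  rfl

lemma pvA1_char (r : List (String × String)) (rest : List (List (String × String))) :
    discover_metric_pairs (r :: rest)
    = (((pvPreferred ++ pvValid (PySem.Dict.ofList r).keys).foldl
      (fun (st : List (String × String × String) × PySem.Set String) (s : String) =>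
        if PySem.Set.contains st.2 s then st
        else
          let sig := "sigmoid_" ++ s
          let inv := "inverse_" ++ s
          if (PySem.Dict.ofList r).keys.contains sig && (PySem.Dict.ofList r).keys.contains inv then
            (st.1 ++ [(s, sig, inv)], PySem.Set.add st.2 s)
          else st)
      ([], PySem.Set.empty)).1) := by
  simp only [discover_metric_pairs]
  rw [pv_loopA1]
  rw [List.nil_append]
  rfl

lemma pv_filter_eq_mem (l : List String) (h : l.Nodup) (a : String) :
    l.filter (fun x => x == a) = if a ∈ l then [a] else [] := by
  rw [List.filter_beq]
  by_cases hm : a ∈ l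
  · rw [if_pos hm, List.count_eq_one_of_mem h hm, List.replicate_one]
  · rw [if_neg hm, List.count_eq_zero_of_not_mem hm, List.replicate_zero]

lemma pv_key0 (s : String) : (pvKey s == (0:Int)) = (s == "topk_conf_mean") := by
  unfold pvKey; split_ifs with a b c d <;> simp_all
lemma pv_key1 (s : String) : (pvKey s == (1:Int)) = (s == "pmr_topk") := by
  unfold pvKey; split_ifs with a b c d <;> simp_all
lemma pv_key2 (s : String) : (pvKey s == (2:Int)) = (s == "next_block_size_mean") := by
  unfold pvKey; split_ifs with a b c d <;> simp_all
lemma pv_key3 (s : String) : (pvKey s == (3:Int)) = (s == "next_block_low_conf_ratio_mean") := by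
  unfold pvKey; split_ifs with a b c d <;> simp_all
lemma pv_key4 (s : String) : (pvKey s == (4:Int)) = !(PySem.Set.contains pvPreferred s) := by
  unfold pvKey
  split_ifs with a b c d <;>
    simp_all [PySem.Set.contains, pvPreferred, List.contains_iff_mem]

lemma pv_bucket_char (cols : List String) (k : Int) :
    pvBucket cols k cols = ((pvValid cols).filter (fun s => pvKey s == k)).map pvPair := by
  unfold pvBucket pvValid
  rw [List.filter_map, List.map_map]
  apply List.map_congr_left
  intro c hc
  have hp : pvIsPair cols c = true := (List.mem_filter.mp (List.mem_of_mem_filter hc)).2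
  have hst : PySem.Str.startswith c "sigmoid_" = true := by
    have h' := hp
    unfold pvIsPair at h'
    exact ((Bool.and_eq_true _ _).mp h').1
  simp only [Function.comp, pvTr, pvPair]
  rw [← pv_decomp c hst]

lemma pv_pref_nodup : pvPreferred.Nodup := by decide

lemma pv_q_decide (cols : List String) (s : String) :
    pvQ cols s = decide (s ∈ pvValid cols) := by
  cases hb : pvQ cols s
  · have : ¬ s ∈ pvValid cols := fun hm => by
      have := (pv_q_iff_mem cols s).mpr hm; rw [hb] at this; exact Bool.false_ne_true this
    simp [this]
  · simp [(pv_q_iff_mem cols s).mp hb]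

theorem pv_main : ∀ rows, discover_metric_pairs rows = discover_metric_pairs_alt rows := by
  intro rows
  cases rows with
  | nil => rfl
  | cons r rest =>
    have hnodup : ((PySem.Dict.ofList r).keys).Nodup := PySem.Dict.nodup_keys_ofList r
    have hvn : (pvValid (PySem.Dict.ofList r).keys).Nodup := pv_valid_nodup _ hnodup
    rw [pvA1_char, pvB_char, pv_loopA2, pv_loopB]
    simp only [List.nil_append, List.flatten]
    rw [pv_bucket_char _ 0, pv_bucket_char _ 1, pv_bucket_char _ 2, pv_bucket_char _ 3,
      pv_bucket_char _ 4]
    have hpred : (fun s => pvQ (PySem.Dict.ofList r).keys s && !(PySem.Set.contains PySem.Set.empty s))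
        = fun s => pvQ (PySem.Dict.ofList r).keys s := by
      funext s; simp [PySem.Set.empty, PySem.Set.contains]
    rw [hpred]
    rw [PySem.Set.ofList_append, PySem.Set.update_eq_append_filter,
      PySem.Set.ofList_eq_self_of_nodup _ pv_pref_nodup, PySem.Set.ofList_eq_self_of_nodup _ hvn]
    rw [List.filter_append, List.map_append]
    have hpart2 : (((pvValid (PySem.Dict.ofList r).keys).filter
          (fun y => !(PySem.Set.contains pvPreferred y))).filter
          (fun s => pvQ (PySem.Dict.ofList r).keys s)).map pvPair
        = ((pvValid (PySem.Dict.ofList r).keys).filter (fun s => pvKey s == (4:Int))).map pvPair := by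
      congr 1
      rw [List.filter_filter]
      apply List.filter_congr
      intro a ha
      rw [pv_key4, (pv_q_iff_mem _ a).mpr ha]
      rfl
    rw [hpart2]
    have hpart1 : ((pvPreferred.filter (fun s => pvQ (PySem.Dict.ofList r).keys s)).map pvPair)
        = ((pvValid (PySem.Dict.ofList r).keys).filter (fun s => pvKey s == (0:Int))).map pvPair
          ++ ((pvValid (PySem.Dict.ofList r).keys).filter (fun s => pvKey s == (1:Int))).map pvPair
          ++ ((pvValid (PySem.Dict.ofList r).keys).filter (fun s => pvKey s == (2:Int))).map pvPair
          ++ ((pvValid (PySem.Dict.ofList r).keys).filter (fun s => pvKey s == (3:Int))).map pvPair := by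
      simp only [pv_key0, pv_key1, pv_key2, pv_key3]
      rw [pv_filter_eq_mem _ hvn, pv_filter_eq_mem _ hvn, pv_filter_eq_mem _ hvn,
        pv_filter_eq_mem _ hvn]
      simp only [pv_q_decide, pvPreferred, List.filter_cons, List.filter_nil]
      by_cases h0 : "topk_conf_mean" ∈ pvValid (PySem.Dict.ofList r).keys <;>
        by_cases h1 : "pmr_topk" ∈ pvValid (PySem.Dict.ofList r).keys <;>
        by_cases h2 : "next_block_size_mean" ∈ pvValid (PySem.Dict.ofList r).keys <;>
        by_cases h3 : "next_block_low_conf_ratio_mean" ∈ pvValid (PySem.Dict.ofList r).keys <;>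
        simp [h0, h1, h2, h3]
    rw [hpart1]
    simp [List.append_assoc]

-- ===== VERDICT (by name: the statement is the Claim_ definition above) =====
theorem discover_metric_pairs_spec : Claim_equal_discover_metric_pairs := by
  intro rows _
  unfold Spec_discover_metric_pairs
  exact pv_main rows
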